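-- pv_equiv track=rewrite | github.com/daniel-reich/ubiquitous-fiesta | bHfb35MfsjyM6DJge_19.py | route_diff
-- ===== SOURCE A (Python) =====
-- def route_diff(directions):
--   x = 0
--   y = 0
--   for direct in directions:
--     if direct == 'N':
--       y += 1
--     elif direct == 'S':
--       y -= 1
--     elif direct == 'E':
--       x += 1
--     elif direct == 'W':
--       x -= 1
--   minSteps = abs(x) + abs(y)
--   yourSteps = len(directions)
--   return yourSteps - minSteps
-- ===== SOURCE B (Python) =====
-- def route_diff(directions):
--   n = directions.count('N')
--   s = directions.count('S')
--   e = directions.count('E')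
--   w = directions.count('W')
--   other = len(directions) - (n + s + e + w)
--   return 2 * (min(n, s) + min(e, w)) + other
-- ===== Notes on version B (the rewrite author's own statement) =====
-- stated objective: alternative
-- what changed: B computes the wasted steps directly as twice the number of cancelling opposite-direction pairs (min(N,S)+min(E,W)) plus the non-direction entries, using staged counts, instead of A's accumulation of a net (x,y) displacement and len-(|x|+|y|).
import Mathlib
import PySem

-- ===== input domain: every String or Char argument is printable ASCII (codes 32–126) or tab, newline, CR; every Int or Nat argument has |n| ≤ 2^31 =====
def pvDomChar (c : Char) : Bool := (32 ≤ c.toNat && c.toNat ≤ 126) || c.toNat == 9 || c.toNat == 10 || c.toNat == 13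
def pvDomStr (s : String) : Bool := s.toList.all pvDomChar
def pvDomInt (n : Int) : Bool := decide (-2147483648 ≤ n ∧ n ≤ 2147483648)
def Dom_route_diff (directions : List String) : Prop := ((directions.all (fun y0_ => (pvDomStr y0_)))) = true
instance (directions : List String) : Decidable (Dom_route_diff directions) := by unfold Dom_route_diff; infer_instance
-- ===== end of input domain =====

-- B computes wasted steps directly as cancelled opposite pairs plus non-direction
-- entries, instead of A's net-displacement accumulation (alternative; same O(n) cost).

-- ===== PORT A =====
def route_diff (directions : List String) : Int :=
  let p := directions.foldl (fun (p : Int × Int) direct =>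
    if direct == "N" then (p.1, p.2 + 1)
    else if direct == "S" then (p.1, p.2 - 1)
    else if direct == "E" then (p.1 + 1, p.2)
    else if direct == "W" then (p.1 - 1, p.2)
    else p) (0, 0)
  let minSteps := |p.1| + |p.2|
  let yourSteps := (directions.length : Int)
  yourSteps - minSteps

-- ===== PORT B =====
def route_diff_alt (directions : List String) : Int :=
  let n : Int := PySem.List.count directions "N"
  let s : Int := PySem.List.count directions "S"
  let e : Int := PySem.List.count directions "E"
  let w : Int := PySem.List.count directions "W"
  let other : Int := (directions.length : Int) - (n + s + e + w)
  2 * (min n s + min e w) + other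

-- ===== PRECONDITION & SPEC =====
def Spec_route_diff (directions : List String) (out : Int) : Prop := out = route_diff_alt directions
instance (directions : List String) (out : Int) : Decidable (Spec_route_diff directions out) := by unfold Spec_route_diff; infer_instance

-- ===== CLAIM (what is proved, stated in full; the proofs are below) =====
def Claim_equal_route_diff : Prop := ∀ (directions : List String), Dom_route_diff directions → Spec_route_diff directions (route_diff directions)

-- ===== LEMMAS AND PROOFS =====

theorem route_diff_foldl_eq (l : List String) (x y : Int) :
    l.foldl (fun (p : Int × Int) direct =>
      if direct == "N" then (p.1, p.2 + 1)
      else if direct == "S" then (p.1, p.2 - 1)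
      else if direct == "E" then (p.1 + 1, p.2)
      else if direct == "W" then (p.1 - 1, p.2)
      else p) (x, y)
    = (x + l.count "E" - l.count "W", y + l.count "N" - l.count "S") := by
  induction l generalizing x y with
  | nil => simp
  | cons h t ih =>
    simp only [List.foldl_cons, List.count_cons, beq_iff_eq] at ih ⊢
    by_cases hN : h = "N"
    · subst hN; rw [if_pos rfl, ih]
      exact Prod.ext (by push_cast; ring) (by push_cast; ring)
    · by_cases hS : h = "S"
      · subst hS; rw [if_neg hN, if_pos rfl, ih]
        exact Prod.ext (by push_cast; ring) (by push_cast; ring)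
      · by_cases hE : h = "E"
        · subst hE; rw [if_neg hN, if_neg hS, if_pos rfl, ih]
          exact Prod.ext (by push_cast; ring) (by push_cast; ring)
        · by_cases hW : h = "W"
          · subst hW; rw [if_neg hN, if_neg hS, if_neg hE, if_pos rfl, ih]
            exact Prod.ext (by push_cast; ring) (by push_cast; ring)
          · rw [if_neg hN, if_neg hS, if_neg hE, if_neg hW, ih]
            simp [hN, hS, hE, hW]

-- ===== VERDICT (by name: the statement is the Claim_ definition above) =====
theorem route_diff_spec : Claim_equal_route_diff := by
  intro directions _
  unfold Spec_route_diff route_diff route_diff_alt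
  rw [route_diff_foldl_eq]
  simp only [PySem.List.count_eq, zero_add]
  have habs : ∀ a b : Int, |a - b| = if a ≤ b then b - a else a - b := by
    intro a b; split_ifs with h
    · rw [abs_sub_comm]; exact abs_of_nonneg (by omega)
    · exact abs_of_nonneg (by omega)
  rw [habs, habs]
  split_ifs <;> omega
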